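-- pv_equiv track=rewrite | github.com/mmi-ing/Algorithm_Programmers | Knights_weapons.py | solution
-- ===== SOURCE A (Python) =====
-- import math
--
-- def solution(number, limit, power):
--     #기사단의 약수의 개수를 저장할 리스트 생성
--     divisors_counts = []
--
--     #number 범위의 각 수에 대해 약수의 개수를 구하고 리스트에 저장
--     for n in range(1, number + 1):
--         count = 0
--         sqrt_n = int(math.sqrt(n))
--         for i in range(1, sqrt_n + 1):
--             if n % i == 0:
--                 count += 2 if i != n // i else 1
--         divisors_counts.append(count)
--
--     #리스트에서 limit를 초과하는 값을 찾아 power로 교체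
--     for i in range(len(divisors_counts)):
--         if divisors_counts[i] > limit:
--             divisors_counts[i] = power
--
--     # 리스트의 모든 값을 합해 필요한 철의 무게를 구한다.
--     answer = sum(divisors_counts)
--
--     return answer
-- ===== SOURCE B (Python) =====
-- def solution(number, limit, power):
--     # divisor-count sieve: bump the count of every multiple of each i
--     counts = [0] * (number + 1)
--     for i in range(1, number + 1):
--         for j in range(1, number // i + 1):
--             counts[i * j] += 1
--     return sum(c if c <= limit else power for c in counts[1:])
-- ===== Notes on version B (the rewrite author's own statement) =====
-- stated objective: faster
-- what changed: Replaces the per-knight sqrt trial-division divisor count with a single divisor-count sieve that increments the count of every multiple of each i, then sums with the limit/power replacement in one comprehension.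
import Mathlib
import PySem

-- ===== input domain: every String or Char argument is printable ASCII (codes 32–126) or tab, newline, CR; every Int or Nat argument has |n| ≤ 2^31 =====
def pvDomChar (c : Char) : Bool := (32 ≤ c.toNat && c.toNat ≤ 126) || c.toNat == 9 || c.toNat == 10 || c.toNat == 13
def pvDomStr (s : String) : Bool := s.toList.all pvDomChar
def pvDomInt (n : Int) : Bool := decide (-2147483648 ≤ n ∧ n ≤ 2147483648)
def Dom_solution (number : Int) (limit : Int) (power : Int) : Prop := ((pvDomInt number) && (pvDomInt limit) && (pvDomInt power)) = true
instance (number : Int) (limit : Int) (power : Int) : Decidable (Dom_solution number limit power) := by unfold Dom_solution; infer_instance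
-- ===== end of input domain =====

-- B replaces A's per-knight sqrt trial-division divisor count by a divisor-count sieve
-- (bump the count of every multiple of each i), then sums with the limit/power replacement.

-- ===== PORT A =====
def solution (number : Int) (limit : Int) (power : Int) : Int :=
  -- for n in range(1, number+1): count the divisors of n by trial division up to int(math.sqrt(n))
  let divisors_counts : List Int :=
    (PySem.List.pyRange 1 (number + 1) 1).foldl (fun l n =>
      -- int(math.sqrt(n)) hand-ported as Nat.sqrt via toNat: exact on the 0 ≤ n ≤ 2^31 of Dom_solution
      let sqrt_n : Int := Int.ofNat (Nat.sqrt n.toNat)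
      let count : Int :=
        (PySem.List.pyRange 1 (sqrt_n + 1) 1).foldl (fun count i =>
          if PySem.Int.mod n i = 0 then
            count + (if i ≠ PySem.Int.floordiv n i then 2 else 1)
          else count) 0
      l ++ [count]) []
  -- for i in range(len(divisors_counts)): if divisors_counts[i] > limit: divisors_counts[i] = power
  let divisors_counts2 : List Int :=
    (PySem.List.pyRange 0 (divisors_counts.length : Int) 1).foldl (fun l i =>
      if PySem.List.pyGetD l i 0 > limit then PySem.List.pySetD l i power else l) divisors_counts
  divisors_counts2.sum

-- ===== PORT B =====
def solution_alt (number : Int) (limit : Int) (power : Int) : Int :=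
  -- counts = [0] * (number + 1)
  let counts : List Int := List.replicate (number + 1).toNat 0
  -- for i in range(1, number+1): for j in range(1, number//i + 1): counts[i*j] += 1
  let counts2 : List Int :=
    (PySem.List.pyRange 1 (number + 1) 1).foldl (fun cs i =>
      (PySem.List.pyRange 1 (PySem.Int.floordiv number i + 1) 1).foldl (fun cs j =>
        PySem.List.pySetD cs (i * j) (PySem.List.pyGetD cs (i * j) 0 + 1)) cs) counts
  -- sum(c if c <= limit else power for c in counts[1:])
  ((PySem.List.slice counts2 (some 1) none).map (fun c => if c ≤ limit then c else power)).sum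

-- ===== PRECONDITION & SPEC =====
def Spec_solution (number : Int) (limit : Int) (power : Int) (out : Int) : Prop := out = solution_alt number limit power
instance (number : Int) (limit : Int) (power : Int) (out : Int) : Decidable (Spec_solution number limit power out) := by unfold Spec_solution; infer_instance

-- ===== CLAIM (what is proved, stated in full; the proofs are below) =====
def Claim_equal_solution : Prop := ∀ (number : Int) (limit : Int) (power : Int), Dom_solution number limit power → Spec_solution number limit power (solution number limit power)

-- ===== LEMMAS AND PROOFS =====

-- the divisor count both programs' lists hold, per knight
def dvc (n : ℕ) : ℕ := n.divisors.card

-- the Nat summand of A's inner loop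
def aTerm (n i : ℕ) : ℕ := if i ∣ n then (if i ≠ n / i then 2 else 1) else 0

-- ---------- A's sqrt pairing counts all divisors ----------

lemma small_to_large (n a : ℕ) (hn0 : n ≠ 0) (hdvd : a ∣ n) (hlt : a * a < n) :
    (n / a ∣ n) ∧ n < (n / a) * (n / a) := by
  obtain ⟨e, rfl⟩ := hdvd
  have ha0 : 0 < a := by
    rcases Nat.eq_zero_or_pos a with h | h
    · subst h; simp at hn0
    · exact h
  have he : a * e / a = e := Nat.mul_div_cancel_left e ha0
  have hae : a < e := by nlinarith
  refine ⟨by rw [he]; exact ⟨a, Nat.mul_comm a e⟩, by rw [he]; nlinarith⟩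

lemma card_small_eq_card_large (n : ℕ) (hn0 : n ≠ 0) :
    (n.divisors.filter (fun i => i * i < n)).card
      = (n.divisors.filter (fun i => n < i * i)).card := by
  apply Finset.card_bij' (fun a _ => n / a) (fun b _ => n / b)
  · intro a ha
    rw [Finset.mem_filter, Nat.mem_divisors] at ha ⊢
    obtain ⟨⟨hdvd, _⟩, hlt⟩ := ha
    obtain ⟨h1, h2⟩ := small_to_large n a hn0 hdvd hlt
    exact ⟨⟨h1, hn0⟩, h2⟩
  · intro b hb
    rw [Finset.mem_filter, Nat.mem_divisors] at hb ⊢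
    obtain ⟨⟨hdvd, _⟩, hgt⟩ := hb
    have hb0 : 0 < b := by
      rcases Nat.eq_zero_or_pos b with h | h
      · subst h; obtain ⟨f, hf⟩ := hdvd; simp at hf; omega
      · exact h
    obtain ⟨f, hf⟩ := hdvd
    have hf0 : 0 < f := by
      rcases Nat.eq_zero_or_pos f with h | h
      · subst h; simp at hf; omega
      · exact h
    have hfb : n / b = f := by rw [hf]; exact Nat.mul_div_cancel_left f hb0
    have hfb' : f < b := by nlinarith
    refine ⟨⟨Nat.div_dvd_of_dvd ⟨f, hf⟩, hn0⟩, ?_⟩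
    rw [hfb]; nlinarith
  · intro a ha
    rw [Finset.mem_filter, Nat.mem_divisors] at ha
    exact Nat.div_div_self ha.1.1 hn0
  · intro b hb
    rw [Finset.mem_filter, Nat.mem_divisors] at hb
    exact Nat.div_div_self hb.1.1 hn0

lemma pairing (n : ℕ) (hn : 1 ≤ n) :
    ∑ i ∈ Finset.Ico 1 (Nat.sqrt n + 1), aTerm n i = n.divisors.card := by
  have hn0 : n ≠ 0 := by omega
  have hset : (Finset.Ico 1 (Nat.sqrt n + 1)).filter (fun i => i ∣ n)
      = n.divisors.filter (fun i => i * i ≤ n) := by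
    ext i
    simp only [Finset.mem_filter, Finset.mem_Ico, Nat.mem_divisors, Nat.lt_succ_iff, Nat.le_sqrt]
    constructor
    · rintro ⟨⟨hi1, hi2⟩, hdvd⟩; exact ⟨⟨hdvd, hn0⟩, hi2⟩
    · rintro ⟨⟨hdvd, _⟩, hle⟩; exact ⟨⟨Nat.pos_of_dvd_of_pos hdvd (by omega), hle⟩, hdvd⟩
  have h1 : ∑ i ∈ Finset.Ico 1 (Nat.sqrt n + 1), aTerm n i
      = ∑ i ∈ n.divisors.filter (fun i => i * i ≤ n), (if i ≠ n / i then 2 else 1) := by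
    simp only [aTerm]
    rw [← Finset.sum_filter, hset]
  rw [h1]
  have hsplit := Finset.sum_filter_add_sum_filter_not
    (n.divisors.filter (fun i => i * i ≤ n)) (fun i => i * i = n) (fun i => if i ≠ n / i then 2 else 1)
  have hE : (n.divisors.filter (fun i => i * i ≤ n)).filter (fun i => i * i = n)
      = n.divisors.filter (fun i => i * i = n) := by
    rw [Finset.filter_filter]; apply Finset.filter_congr; intro i _; constructor <;> intro h
    · exact h.2
    · exact ⟨le_of_eq h, h⟩
  have hS2 : (n.divisors.filter (fun i => i * i ≤ n)).filter (fun i => ¬ i * i = n)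
      = n.divisors.filter (fun i => i * i < n) := by
    rw [Finset.filter_filter]; apply Finset.filter_congr; intro i _; constructor <;> intro h <;> omega
  have hval1 : ∑ i ∈ (n.divisors.filter (fun i => i * i ≤ n)).filter (fun i => i * i = n),
      (if i ≠ n / i then 2 else 1) = (n.divisors.filter (fun i => i * i = n)).card := by
    rw [hE]
    rw [Finset.sum_congr rfl (fun i hi => ?_), Finset.sum_const, smul_eq_mul, Nat.mul_one]
    rw [Finset.mem_filter, Nat.mem_divisors] at hi
    have hi0 : 0 < i := Nat.pos_of_dvd_of_pos hi.1.1 (by omega)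
    have : n / i = i := by rw [← hi.2]; exact Nat.mul_div_cancel_left i hi0
    simp [this]
  have hval2 : ∑ i ∈ (n.divisors.filter (fun i => i * i ≤ n)).filter (fun i => ¬ i * i = n),
      (if i ≠ n / i then 2 else 1) = 2 * (n.divisors.filter (fun i => i * i < n)).card := by
    rw [hS2]
    rw [Finset.sum_congr rfl (fun i hi => ?_), Finset.sum_const, smul_eq_mul, Nat.mul_comm]
    rw [Finset.mem_filter, Nat.mem_divisors] at hi
    have hi0 : 0 < i := Nat.pos_of_dvd_of_pos hi.1.1 (by omega)
    have hne : i ≠ n / i := by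
      intro h
      obtain ⟨e, he⟩ := hi.1.1
      have : n / i = e := by rw [he]; exact Nat.mul_div_cancel_left e hi0
      nlinarith [hi.2]
    simp [hne]
  have hcard1 := Finset.filter_card_add_filter_neg_card_eq_card
    (s := n.divisors) (fun i => i * i ≤ n)
  have hcardS : (n.divisors.filter (fun i => i * i ≤ n)).card
      = (n.divisors.filter (fun i => i * i < n)).card
        + (n.divisors.filter (fun i => i * i = n)).card := by
    have := Finset.filter_card_add_filter_neg_card_eq_card
      (s := n.divisors.filter (fun i => i * i ≤ n)) (fun i => i * i = n)
    rw [hE, hS2] at this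
    omega
  have hLS : (n.divisors.filter (fun i => ¬ i * i ≤ n)) = (n.divisors.filter (fun i => n < i * i)) := by
    apply Finset.filter_congr; intro i _; constructor <;> intro h <;> omega
  rw [← hsplit, hval1, hval2]
  rw [hLS] at hcard1
  have hbij := card_small_eq_card_large n hn0
  omega

-- ---------- A's inner loop evaluated ----------

lemma list_range_cast_sum (s : ℕ) (f : ℕ → ℕ) :
    ((List.range s).map (fun k => ((f k : ℕ) : Int))).sum = ((∑ k ∈ Finset.range s, f k : ℕ) : Int) := by
  rw [show (fun k => ((f k : ℕ) : Int)) = (Nat.cast ∘ f) from rfl, ← List.map_map,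
    ← Nat.cast_list_sum]
  rfl

lemma acount_eq (n : ℕ) (hn : 1 ≤ n) :
    (PySem.List.pyRange 1 ((Nat.sqrt n : Int) + 1) 1).foldl (fun count i =>
        if PySem.Int.mod (n : Int) i = 0 then
          count + (if i ≠ PySem.Int.floordiv (n : Int) i then 2 else 1)
        else count) 0
    = ((dvc n : ℕ) : Int) := by
  have hIco : ∑ i ∈ Finset.Ico 1 (Nat.sqrt n + 1), aTerm n i = dvc n := pairing n hn
  rw [PySem.List.pyRange_one]
  have hs : (((Nat.sqrt n : Int) + 1) - 1).toNat = Nat.sqrt n := by simp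
  rw [hs, List.foldl_map]
  rw [PySem.List.foldl_congr_mem _ _
    (fun count k => count + ((aTerm n (k + 1) : ℕ) : Int)) 0 ?_]
  · rw [PySem.List.foldl_add, list_range_cast_sum, zero_add, Nat.cast_inj]
    rw [← hIco, Finset.sum_Ico_eq_sum_range]
    simp [Nat.add_comm]
  · intro acc k hk
    have hcast : (1 : Int) + (k : Int) = ((k + 1 : ℕ) : Int) := by push_cast; ring
    rw [hcast, PySem.Int.floordiv_natCast n (k+1)]
    have hmod : (PySem.Int.mod (n : Int) ((k+1 : ℕ) : Int) = 0) ↔ ((k+1) ∣ n) := by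
      rw [PySem.Int.mod_eq_zero_iff_dvd, Int.natCast_dvd_natCast]
    simp only [aTerm]
    by_cases hdvd : (k+1) ∣ n
    · rw [if_pos (hmod.mpr hdvd), if_pos hdvd]
      by_cases hne : (k+1) = n / (k+1)
      · rw [if_neg (not_not_intro (by exact_mod_cast hne)),
          if_neg (not_not_intro hne)]
        norm_num
      · rw [if_pos (by exact_mod_cast hne : ((k+1:ℕ) : Int) ≠ ((n/(k+1) : ℕ) : Int)),
          if_pos hne]
        norm_num
    · rw [if_neg (fun h => hdvd (hmod.mp h)), if_neg hdvd]
      norm_num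

-- ---------- A's replacement loop is a map ----------

lemma replace_loop (limit power : Int) (pre post : List Int) :
    (PySem.List.pyRange (pre.length : Int) (((pre ++ post).length : ℕ) : Int) 1).foldl
        (fun l i => if PySem.List.pyGetD l i 0 > limit then PySem.List.pySetD l i power else l)
        (pre ++ post)
      = pre ++ post.map (fun c => if c > limit then power else c) := by
  induction post generalizing pre with
  | nil => simp [PySem.List.pyRange_one_eq_nil (le_refl _)]
  | cons c rest ih =>
    have hlen : ((pre.length : Int)) < (((pre ++ c :: rest).length : ℕ) : Int) := by
      simp
    rw [PySem.List.pyRange_one_cons hlen, List.foldl_cons]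
    have hget : PySem.List.pyGetD (pre ++ c :: rest) (pre.length : Int) 0 = c := by
      rw [PySem.List.pyGetD_natCast]
      simp [List.getD_eq_getElem?_getD]
    have hstep : (if PySem.List.pyGetD (pre ++ c :: rest) (pre.length : Int) 0 > limit
          then PySem.List.pySetD (pre ++ c :: rest) (pre.length : Int) power
          else (pre ++ c :: rest))
        = (pre ++ [if c > limit then power else c]) ++ rest := by
      rw [hget, PySem.List.pySetD_natCast]
      by_cases h : c > limit
      · simp [h, List.set_append_right _ _ (le_refl _)]
      · simp [h]
    rw [hstep]
    have h1 : ((pre ++ [if c > limit then power else c]).length : Int) = (pre.length : Int) + 1 := by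
      simp
    have := ih (pre ++ [if c > limit then power else c])
    rw [h1] at this
    have hlen2 : (((pre ++ [if c > limit then power else c]) ++ rest).length : ℕ)
        = ((pre ++ c :: rest).length : ℕ) := by simp
    rw [hlen2] at this
    rw [this]
    simp

lemma replace_loop0 (limit power : Int) (l : List Int) :
    (PySem.List.pyRange 0 ((l.length : ℕ) : Int) 1).foldl
        (fun t i => if PySem.List.pyGetD t i 0 > limit then PySem.List.pySetD t i power else t) l
      = l.map (fun c => if c > limit then power else c) := by
  have := replace_loop limit power [] l
  simpa using this

-- ---------- B's sieve, pointwise ----------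

lemma incr_foldl (L : List Int) (cs : List Int) (hnd : L.Nodup)
    (hmem : ∀ x ∈ L, 0 ≤ x ∧ x.toNat < cs.length) (m : ℕ) :
    ((L.foldl (fun cs x => PySem.List.pySetD cs x (PySem.List.pyGetD cs x 0 + 1)) cs).getD m 0)
      = cs.getD m 0 + (if (m : Int) ∈ L then 1 else 0) := by
  induction L generalizing cs with
  | nil => simp
  | cons x L ih =>
    obtain ⟨hx0, hxlt⟩ := hmem x (List.mem_cons_self ..)
    have hset : PySem.List.pySetD cs x (PySem.List.pyGetD cs x 0 + 1)
        = cs.set x.toNat (cs.getD x.toNat 0 + 1) := by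
      rw [PySem.List.pySetD_of_nonneg _ _ hx0, PySem.List.pyGetD_of_nonneg _ _ hx0]
    rw [List.foldl_cons, hset,
      ih _ hnd.of_cons (fun y hy => by
        simpa [List.length_set] using hmem y (List.mem_cons_of_mem _ hy))]
    by_cases hm : (m : Int) = x
    · subst hm
      have hnotin : (m : Int) ∉ L := (List.nodup_cons.mp hnd).1
      have hlt : m < cs.length := by simpa using hxlt
      simp [hnotin, List.getD_eq_getElem?_getD, hlt, List.getElem?_eq_getElem]
    · have hne : x.toNat ≠ m := by omega
      simp [hm, List.getD_eq_getElem?_getD, List.getElem?_set_ne hne]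

lemma incr_foldl_length (L : List Int) (cs : List Int) :
    (L.foldl (fun cs x => PySem.List.pySetD cs x (PySem.List.pyGetD cs x 0 + 1)) cs).length
      = cs.length := by
  induction L generalizing cs with
  | nil => rfl
  | cons x L ih => simp [List.foldl_cons, ih, PySem.List.length_pySetD]

lemma mults_mem (N i m : Int) (hi : 1 ≤ i) (hN : 0 ≤ N) :
    ((m ∈ (PySem.List.pyRange 1 (PySem.Int.floordiv N i + 1) 1).map (fun j => i * j))
      ↔ (i ∣ m ∧ 1 ≤ m ∧ m ≤ N)) := by
  rw [PySem.Int.floordiv_eq_ediv_of_pos (by omega)]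
  simp only [List.mem_map, PySem.List.mem_pyRange_one]
  constructor
  · rintro ⟨j, ⟨hj1, hj2⟩, rfl⟩
    have hj3 : j ≤ N / i := by omega
    have h1 : i * j ≤ N := by
      calc i * j ≤ i * (N / i) := by
            exact mul_le_mul_of_nonneg_left hj3 (by omega)
        _ ≤ N := by
            conv_rhs => rw [← Int.mul_ediv_add_emod N i]
            have := Int.emod_nonneg N (by omega : i ≠ 0)
            omega
    exact ⟨⟨j, rfl⟩, by nlinarith, h1⟩
  · rintro ⟨⟨j, rfl⟩, h1, h2⟩
    have hj1 : 1 ≤ j := by nlinarith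
    have hj2 : j ≤ N / i := by
      rw [Int.le_ediv_iff_mul_le (by omega)]
      linarith [mul_comm i j]
    exact ⟨j, ⟨hj1, by omega⟩, rfl⟩

lemma sieve_step (N i : Int) (hi : 1 ≤ i) (hN : 0 ≤ N) (cs : List Int)
    (hlen : cs.length = (N + 1).toNat) (m : ℕ) :
    (((PySem.List.pyRange 1 (PySem.Int.floordiv N i + 1) 1).foldl
        (fun cs j => PySem.List.pySetD cs (i * j) (PySem.List.pyGetD cs (i * j) 0 + 1)) cs).getD m 0)
      = cs.getD m 0 + (if i ∣ (m : Int) ∧ 1 ≤ (m : Int) ∧ (m : Int) ≤ N then 1 else 0) := by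
  rw [← (List.foldl_map (f := fun j => i * j)
      (g := fun cs x => PySem.List.pySetD cs x (PySem.List.pyGetD cs x 0 + 1))
      (l := PySem.List.pyRange 1 (PySem.Int.floordiv N i + 1) 1) (init := cs))]
  rw [incr_foldl _ _ ?_ ?_ m]
  · simp only [mults_mem N i m hi hN]
  · exact (PySem.List.nodup_pyRange_one _ _).map
      (fun a b h => by
        have : i ≠ 0 := by omega
        exact mul_left_cancel₀ this h)
  · intro x hx
    rw [mults_mem N i x hi hN] at hx
    refine ⟨by omega, by rw [hlen]; omega⟩

lemma sieve_step_length (N i : Int) (cs : List Int) :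
    (((PySem.List.pyRange 1 (PySem.Int.floordiv N i + 1) 1).foldl
        (fun cs j => PySem.List.pySetD cs (i * j) (PySem.List.pyGetD cs (i * j) 0 + 1)) cs).length)
      = cs.length := by
  rw [← (List.foldl_map (f := fun j => i * j)
      (g := fun cs x => PySem.List.pySetD cs x (PySem.List.pyGetD cs x 0 + 1))
      (l := PySem.List.pyRange 1 (PySem.Int.floordiv N i + 1) 1) (init := cs))]
  exact incr_foldl_length _ _

lemma sieve_foldl (N : Int) (hN : 0 ≤ N) (I : List Int) (hI : ∀ i ∈ I, 1 ≤ i)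
    (cs : List Int) (hlen : cs.length = (N + 1).toNat) (m : ℕ) :
    ((I.foldl (fun cs i =>
        (PySem.List.pyRange 1 (PySem.Int.floordiv N i + 1) 1).foldl
          (fun cs j => PySem.List.pySetD cs (i * j) (PySem.List.pyGetD cs (i * j) 0 + 1)) cs) cs).getD m 0)
      = cs.getD m 0 + (if 1 ≤ (m : Int) ∧ (m : Int) ≤ N then
          (I.countP (fun i => decide (i ∣ (m : Int))) : Int) else 0) := by
  induction I generalizing cs with
  | nil => simp
  | cons i I ih =>
    have hi : 1 ≤ i := hI i (List.mem_cons_self ..)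
    rw [List.foldl_cons, ih (fun y hy => hI y (List.mem_cons_of_mem _ hy)) _
      (by rw [sieve_step_length, hlen]),
      sieve_step N i hi hN cs hlen m]
    have hcnt : ((i :: I).countP (fun i => decide (i ∣ (m : Int))) : Int)
        = (I.countP (fun i => decide (i ∣ (m : Int))) : Int) + (if i ∣ (m : Int) then 1 else 0) := by
      by_cases hdvd : i ∣ (m : Int) <;> simp [List.countP_cons, hdvd]
    by_cases hm : 1 ≤ (m : Int) ∧ (m : Int) ≤ N
    · rw [if_pos hm, if_pos hm, hcnt]
      by_cases hdvd : i ∣ (m : Int)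
      · rw [if_pos ⟨hdvd, hm.1, hm.2⟩, if_pos hdvd]; ring
      · rw [if_neg (fun h => hdvd h.1), if_neg hdvd]; ring
    · rw [if_neg hm, if_neg hm, if_neg (fun h => hm ⟨h.2.1, h.2.2⟩)]; ring

lemma sieve_foldl_length (N : Int) (I : List Int) (cs : List Int) :
    ((I.foldl (fun cs i =>
        (PySem.List.pyRange 1 (PySem.Int.floordiv N i + 1) 1).foldl
          (fun cs j => PySem.List.pySetD cs (i * j) (PySem.List.pyGetD cs (i * j) 0 + 1)) cs) cs).length)
      = cs.length := by
  induction I generalizing cs with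
  | nil => rfl
  | cons i I ih => rw [List.foldl_cons, ih, sieve_step_length]

-- ---------- divisor counting by countP ----------

lemma range_countP_divisors (s m : ℕ) (hm1 : 1 ≤ m) (hms : m ≤ s) :
    (List.range s).countP (fun k => decide ((k+1) ∣ m)) = m.divisors.card := by
  have h1 : (List.range s).countP (fun k => decide ((k+1) ∣ m))
      = ((Finset.range s).filter (fun k => (k+1) ∣ m)).card := by
    simp [Finset.filter, Finset.range, Multiset.range, Finset.card, Multiset.filter_coe,
      List.countP_eq_length_filter]
  rw [h1]
  refine Finset.card_bij' (fun k _ => k + 1) (fun d _ => d - 1) ?_ ?_ ?_ ?_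
  · intro k hk
    rw [Finset.mem_filter, Finset.mem_range] at hk
    rw [Nat.mem_divisors]
    exact ⟨hk.2, by omega⟩
  · intro d hd
    rw [Nat.mem_divisors] at hd
    have hd1 : 1 ≤ d := Nat.pos_of_dvd_of_pos hd.1 (by omega)
    have hdm : d ≤ m := Nat.le_of_dvd (by omega) hd.1
    refine Finset.mem_filter.mpr ⟨Finset.mem_range.mpr ?_, ?_⟩
    · show d - 1 < s
      omega
    · show d - 1 + 1 ∣ m
      rw [Nat.sub_add_cancel hd1]
      exact hd.1
  · intro k _
    show k + 1 - 1 = k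
    omega
  · intro d hd
    rw [Nat.mem_divisors] at hd
    have : 1 ≤ d := Nat.pos_of_dvd_of_pos hd.1 (by omega)
    show d - 1 + 1 = d
    omega

lemma countP_divisors (N : Int) (m : ℕ) (hm1 : 1 ≤ m) (hmN : (m : Int) ≤ N) :
    ((PySem.List.pyRange 1 (N + 1) 1).countP (fun i => decide (i ∣ (m : Int))) : ℕ)
      = dvc m := by
  rw [PySem.List.pyRange_one, List.countP_map]
  have hs : ((N : Int) + 1 - 1).toNat = N.toNat := by omega
  rw [hs]
  rw [List.countP_congr (fun k hk => ?_) (q := fun k => decide ((k+1) ∣ m))]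
  · exact range_countP_divisors N.toNat m hm1 (by omega)
  · have : ((1 : Int) + (k : Int)) = ((k + 1 : ℕ) : Int) := by push_cast; ring
    simp only [Function.comp, this, Int.natCast_dvd_natCast]

-- ---------- the two programs, evaluated ----------

lemma solution_eval (number limit power : Int) (h : 1 ≤ number) :
    solution number limit power
      = ((List.range number.toNat).map (fun k =>
          if ((dvc (k+1) : ℕ) : Int) > limit then power else ((dvc (k+1) : ℕ) : Int))).sum := by
  unfold solution
  rw [PySem.List.foldl_append_singleton_eq_map]
  simp only [List.nil_append]
  rw [show ((PySem.List.pyRange 1 (number+1) 1).map _) =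
      (List.range number.toNat).map (fun k => ((dvc (k+1) : ℕ) : Int)) from ?_]
  · rw [replace_loop0, List.map_map]
    apply congrArg List.sum
    apply List.map_congr_left
    intro k _
    simp only [Function.comp]
  · rw [PySem.List.pyRange_one]
    have hs : ((number + 1) - 1).toNat = number.toNat := by omega
    rw [hs, List.map_map]
    apply List.map_congr_left
    intro k _
    have hcast : (1 : Int) + (k : Int) = ((k + 1 : ℕ) : Int) := by push_cast; ring
    simp only [Function.comp, hcast]
    have htn : (((k + 1 : ℕ) : Int)).toNat = k + 1 := by omega
    rw [htn]
    exact acount_eq (k+1) (by omega)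

lemma solution_alt_eval (number limit power : Int) (h : 1 ≤ number) :
    solution_alt number limit power
      = ((List.range number.toNat).map (fun k =>
          if ((dvc (k+1) : ℕ) : Int) ≤ limit then ((dvc (k+1) : ℕ) : Int) else power)).sum := by
  show ((PySem.List.slice
      ((PySem.List.pyRange 1 (number + 1) 1).foldl (fun cs i =>
        (PySem.List.pyRange 1 (PySem.Int.floordiv number i + 1) 1).foldl (fun cs j =>
          PySem.List.pySetD cs (i * j) (PySem.List.pyGetD cs (i * j) 0 + 1)) cs)
        (List.replicate (number + 1).toNat (0 : Int))) (some 1) none).map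
      (fun c => if c ≤ limit then c else power)).sum = _
  have ht : (number + 1).toNat = number.toNat + 1 := by omega
  have hrep : ∀ m : ℕ, (List.replicate (number + 1).toNat (0 : Int)).getD m 0 = 0 := by
    intro m
    simp [List.getD_eq_getElem?_getD, List.getElem?_replicate]
    split_ifs <;> rfl
  have hlen : ((PySem.List.pyRange 1 (number + 1) 1).foldl (fun cs i =>
      (PySem.List.pyRange 1 (PySem.Int.floordiv number i + 1) 1).foldl (fun cs j =>
        PySem.List.pySetD cs (i * j) (PySem.List.pyGetD cs (i * j) 0 + 1)) cs)
      (List.replicate (number + 1).toNat (0 : Int))).length = number.toNat + 1 := by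
    have h0 := sieve_foldl_length number (PySem.List.pyRange 1 (number + 1) 1)
      (List.replicate (number + 1).toNat (0 : Int))
    exact h0.trans (by rw [List.length_replicate, ht])
  have hC : ((PySem.List.pyRange 1 (number + 1) 1).foldl (fun cs i =>
      (PySem.List.pyRange 1 (PySem.Int.floordiv number i + 1) 1).foldl (fun cs j =>
        PySem.List.pySetD cs (i * j) (PySem.List.pyGetD cs (i * j) 0 + 1)) cs)
      (List.replicate (number + 1).toNat (0 : Int)))
      = (List.range (number.toNat + 1)).map (fun m =>
          if 1 ≤ m ∧ m ≤ number.toNat then ((dvc m : ℕ) : Int) else 0) := by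
    apply List.ext_getElem (by simp [hlen])
    intro i h1 h2
    have hgd := sieve_foldl number (by omega) (PySem.List.pyRange 1 (number + 1) 1)
      (fun y hy => (PySem.List.mem_pyRange_one.mp hy).1)
      (List.replicate (number + 1).toNat (0 : Int)) (by simp) i
    rw [hrep i, zero_add] at hgd
    rw [← List.getD_eq_getElem _ 0 (by omega), hgd]
    · rw [List.getElem_map, List.getElem_range]
      by_cases hi : 1 ≤ i ∧ i ≤ number.toNat
      · rw [if_pos (by constructor <;> [exact_mod_cast Nat.one_le_cast.mpr hi.1; omega]),
          if_pos hi]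
        rw [show ((PySem.List.pyRange 1 (number + 1) 1).countP (fun x => decide (x ∣ (i:Int))) : Int)
            = ((dvc i : ℕ) : Int) from ?_]
        exact_mod_cast congrArg (Nat.cast : ℕ → Int) (countP_divisors number i hi.1 (by omega))
      · rw [if_neg (by omega), if_neg hi]
  rw [hC, PySem.List.slice_from_one, List.range_succ_eq_map, List.map_cons, List.tail_cons,
    List.map_map, List.map_map]
  apply congrArg List.sum
  apply List.map_congr_left
  intro k hk
  rw [List.mem_range] at hk
  have hpos1 : (if 1 ≤ k + 1 ∧ k + 1 ≤ number.toNat then ((dvc (k+1) : ℕ) : Int) else 0)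
      = ((dvc (k+1) : ℕ) : Int) := if_pos (by omega)
  simp only [Function.comp, Nat.succ_eq_add_one, hpos1]

lemma solution_zero (number limit power : Int) (h : number < 1) :
    solution number limit power = 0 := by
  unfold solution
  rw [PySem.List.pyRange_one_eq_nil (by omega : number + 1 ≤ 1)]
  simp [PySem.List.pyRange_one_eq_nil (le_refl (0 : Int))]

lemma solution_alt_zero (number limit power : Int) (h : number < 1) :
    solution_alt number limit power = 0 := by
  unfold solution_alt
  rw [PySem.List.pyRange_one_eq_nil (by omega : number + 1 ≤ 1)]
  simp only [List.foldl_nil, PySem.List.slice_from_one]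
  rw [List.tail_replicate]
  have : (number + 1).toNat - 1 = 0 := by omega
  rw [this]
  simp

-- ===== VERDICT (by name: the statement is the Claim_ definition above) =====
theorem solution_spec : Claim_equal_solution := by
  intro number limit power _
  unfold Spec_solution
  by_cases hpos : 1 ≤ number
  · rw [solution_eval number limit power hpos, solution_alt_eval number limit power hpos]
    apply congrArg List.sum
    apply List.map_congr_left
    intro k _
    by_cases hc : ((dvc (k+1) : ℕ) : Int) ≤ limit
    · rw [if_neg (by omega), if_pos hc]
    · rw [if_pos (by omega), if_neg hc]
  · rw [solution_zero number limit power (by omega),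
      solution_alt_zero number limit power (by omega)]
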